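-- pv_equiv track=rewrite | github.com/tazwadshezed/dataserver | apps/sitedata/access_utils.py | graphkey_device_hierarchy_label
-- ===== SOURCE A (Python) =====
-- from typing import List
-- from typing import Optional
-- from typing import Dict, Any, Optional
-- from typing import Dict, Any, Optional
-- from typing import Dict, Any, Optional
--
-- devtypes = {
--     "SA": "Site Array",
--     "A": "Site Array",
--     "I": "Inverter",
--     "B": "Bus",
--     "R": "Recombiner",
--     "C": "Combiner",
--     "S": "String",
--     "P": "Panel",
--     "SLE": "SPT String Level Equalizer",
--     "SPM": "SPT Panel Monitor",
--     "SPO": "SPT Panel Monitor",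
--     "PLM": "SPT Panel Monitor",  # old
--     "PLO": "SPT Panel Monitor",  # old
--     "S1W": "String 1 Wire",
--     "ACM": "AC Meter",
--     "SGW": "SPT Gateway",
--     "SSS": "SPT Site Server",
--     "SSC": "Site Server Computer",
--     "ESI": "Env Sensor Interface",
--     "ABT": "Ambient Temperature Sensor",
--     "CET": "Cell Temperature Sensor",
--     "IRR": "Irradiance Sensor",
-- }
--
-- def graphkey_current_label(gk):
--     """
--     Returns the label portion of the current nodes graphkey
--
--     Excludes the devtype.
--     """
--     if '.' in gk:
--         return gk.split('.')[-1].split(':')[-1]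
--     else:
--         return gk.split(':')[-1]
--
-- def graphkey_device_hierarchy_label(gk, exclude_devtypes=set(['SA', 'A', 'B'])):
--     if '.' in gk:
--         devtype = graphkey_devtype(gk)
--         label = graphkey_current_label(gk)
--         parents = all_graphkey_parents(gk)
--
--         text = "%s %s" % (devtypes[devtype], label)
--
--         for parent in parents:
--             pdevtype = graphkey_devtype(parent)
--             plabel = graphkey_current_label(parent)
--
--             if exclude_devtypes \
--             and pdevtype in exclude_devtypes:
--                 continue
--
--             text += " in %s %s" % (devtypes[pdevtype], plabel)
--
--         return text
--     else:
--         return gk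
--
-- def graphkey_token_devtype(token: str) -> str:
--     """Returns the device type of a graph key token."""
--     return token.split(":")[0]
--
-- def graphkey_devtype(gk: str) -> str:
--     """Returns the device type of a given graph key."""
--     tokens = gk.split(".")
--     return graphkey_token_devtype(tokens[-1])
--
-- def graphkey_parent(gk: str, devtype: Optional[str] = None) -> str:
--     """Return the parent graph key of a given graph key."""
--     if "." in gk:
--         tokens = gk.split(".")
--         if devtype is None:
--             tokens = tokens[:-1]
--         else:
--             devtypes_list = [graphkey_token_devtype(x) for x in tokens]
--             i = devtypes_list.index(devtype)
--             tokens = tokens[: i + 1]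
--         return ".".join(tokens)
--     return gk
--
-- def all_graphkey_parents(gk: str) -> List[str]:
--     """Return a list of all parent graph keys."""
--     parent_gkeys = []
--     current_gk = gk
--     while "." in current_gk:
--         current_gk = graphkey_parent(current_gk)
--         parent_gkeys.append(current_gk)
--     return parent_gkeys
-- ===== SOURCE B (Python) =====
-- devtypes = {
--     "SA": "Site Array",
--     "A": "Site Array",
--     "I": "Inverter",
--     "B": "Bus",
--     "R": "Recombiner",
--     "C": "Combiner",
--     "S": "String",
--     "P": "Panel",
--     "SLE": "SPT String Level Equalizer",
--     "SPM": "SPT Panel Monitor",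
--     "SPO": "SPT Panel Monitor",
--     "PLM": "SPT Panel Monitor",
--     "PLO": "SPT Panel Monitor",
--     "S1W": "String 1 Wire",
--     "ACM": "AC Meter",
--     "SGW": "SPT Gateway",
--     "SSS": "SPT Site Server",
--     "SSC": "Site Server Computer",
--     "ESI": "Env Sensor Interface",
--     "ABT": "Ambient Temperature Sensor",
--     "CET": "Cell Temperature Sensor",
--     "IRR": "Irradiance Sensor",
-- }
--
-- def graphkey_device_hierarchy_label(gk, exclude_devtypes=set(['SA', 'A', 'B'])):
--     # Single pass: split once, walk the tokens from the leaf upwards; never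
--     # rebuilds or re-splits parent graphkeys.
--     if '.' not in gk:
--         return gk
--     parts = []
--     for tok in reversed(gk.split('.')):
--         dt = tok.split(':')[0]
--         if parts and exclude_devtypes and dt in exclude_devtypes:
--             continue
--         parts.append("%s %s" % (devtypes[dt], tok.split(':')[-1]))
--     return " in ".join(parts)
-- ===== Notes on version B (the rewrite author's own statement) =====
-- stated objective: simpler
-- what changed: B splits the graphkey once and walks the token list from the leaf upwards, joining the formatted parts, instead of rebuilding every parent graphkey string and re-splitting it for its devtype and label.
import Mathlib
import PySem

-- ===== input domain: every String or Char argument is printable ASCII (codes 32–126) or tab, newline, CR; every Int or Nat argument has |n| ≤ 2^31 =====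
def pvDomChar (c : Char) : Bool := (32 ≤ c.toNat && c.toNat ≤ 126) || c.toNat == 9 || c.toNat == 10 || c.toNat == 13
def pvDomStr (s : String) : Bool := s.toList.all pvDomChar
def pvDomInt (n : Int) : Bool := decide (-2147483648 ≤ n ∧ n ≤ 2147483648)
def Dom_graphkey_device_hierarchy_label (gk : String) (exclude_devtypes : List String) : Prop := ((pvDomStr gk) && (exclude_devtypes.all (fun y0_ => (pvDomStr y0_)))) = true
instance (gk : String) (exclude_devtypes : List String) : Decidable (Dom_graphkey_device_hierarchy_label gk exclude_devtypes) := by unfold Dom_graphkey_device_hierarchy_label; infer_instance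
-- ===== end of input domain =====

-- B rewrites A's label builder to split the graphkey ONCE and walk the token list
-- from the leaf upwards, joining the formatted parts, instead of rebuilding and
-- re-splitting every parent graphkey (objective: simpler — one pass, no helper chain).

-- ===== PORT A =====

-- module constant `devtypes` (a dict literal)
def pvDevtypes : PySem.Dict String String :=
  ⟨[("SA", "Site Array"), ("A", "Site Array"), ("I", "Inverter"), ("B", "Bus"),
   ("R", "Recombiner"), ("C", "Combiner"), ("S", "String"), ("P", "Panel"),
   ("SLE", "SPT String Level Equalizer"), ("SPM", "SPT Panel Monitor"),
   ("SPO", "SPT Panel Monitor"), ("PLM", "SPT Panel Monitor"), ("PLO", "SPT Panel Monitor"),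
   ("S1W", "String 1 Wire"), ("ACM", "AC Meter"), ("SGW", "SPT Gateway"),
   ("SSS", "SPT Site Server"), ("SSC", "Site Server Computer"), ("ESI", "Env Sensor Interface"),
   ("ABT", "Ambient Temperature Sensor"), ("CET", "Cell Temperature Sensor"),
   ("IRR", "Irradiance Sensor")]⟩

-- devtypes[k]; the `.getD ""` is only reached where Python raises KeyError (excluded by Pre_)
def pvDevtypesGet (k : String) : String := (PySem.Dict.get? pvDevtypes k).getD ""

-- s.split(sep) with a non-empty literal sep (never raises)
def pvSplit (s sep : String) : List String := (PySem.Str.split? s sep).getD []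

-- token.split(":")[0]  (split results are non-empty, so the index never raises)
def graphkey_token_devtype (token : String) : String :=
  (PySem.List.pyGet? (pvSplit token ":") 0).getD ""

def graphkey_devtype (gk : String) : String :=
  graphkey_token_devtype ((PySem.List.pyGet? (pvSplit gk ".") (-1)).getD "")

def graphkey_current_label (gk : String) : String :=
  if PySem.Str.isIn "." gk then
    (PySem.List.pyGet? (pvSplit ((PySem.List.pyGet? (pvSplit gk ".") (-1)).getD "") ":") (-1)).getD ""
  else
    (PySem.List.pyGet? (pvSplit gk ":") (-1)).getD ""

-- graphkey_parent with devtype=None (the only way A calls it)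
def graphkey_parent (gk : String) : String :=
  if PySem.Str.isIn "." gk then
    PySem.Str.join "." ((pvSplit gk ".").dropLast)
  else gk

-- the `while "." in current_gk` loop; fuel |cur|+1 suffices since the parent is strictly shorter
def pvParentsLoop : Nat → String → List String
  | 0, _ => []
  | fuel+1, cur =>
    if PySem.Str.isIn "." cur then
      let p := graphkey_parent cur
      p :: pvParentsLoop fuel p
    else []

def all_graphkey_parents (gk : String) : List String :=
  pvParentsLoop (gk.toList.length + 1) gk

def graphkey_device_hierarchy_label (gk : String) (exclude_devtypes : List String) : String :=
  if PySem.Str.isIn "." gk then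
    let devtype := graphkey_devtype gk
    let label := graphkey_current_label gk
    let parents := all_graphkey_parents gk
    let text := pvDevtypesGet devtype ++ " " ++ label
    parents.foldl (fun text parent =>
      let pdevtype := graphkey_devtype parent
      let plabel := graphkey_current_label parent
      if !exclude_devtypes.isEmpty && exclude_devtypes.contains pdevtype then text
      else text ++ " in " ++ pvDevtypesGet pdevtype ++ " " ++ plabel) text
  else gk

-- ===== PORT B =====

def graphkey_device_hierarchy_label_alt (gk : String) (exclude_devtypes : List String) : String :=
  if PySem.Str.isIn "." gk then
    let parts := ((pvSplit gk ".").reverse).foldl (fun parts tok =>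
      let dt := (PySem.List.pyGet? (pvSplit tok ":") 0).getD ""
      if !parts.isEmpty && (!exclude_devtypes.isEmpty && exclude_devtypes.contains dt) then parts
      else parts ++ [pvDevtypesGet dt ++ " " ++ (PySem.List.pyGet? (pvSplit tok ":") (-1)).getD ""]) []
    PySem.Str.join " in " parts
  else gk

-- ===== PRECONDITION & SPEC =====
-- Pre_ excludes exactly the inputs where Python A raises KeyError: a dotted graphkey
-- whose leaf token's devtype is not in `devtypes`, or with a non-excluded parent token
-- whose devtype is not in `devtypes`.
def Pre_graphkey_device_hierarchy_label (gk : String) (exclude_devtypes : List String) : Prop :=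
  PySem.Str.isIn "." gk = true →
    ((PySem.Dict.get? pvDevtypes (graphkey_token_devtype ((pvSplit gk ".").getLastD ""))).isSome = true ∧
     ∀ tok ∈ (pvSplit gk ".").dropLast,
       (exclude_devtypes ≠ [] ∧ exclude_devtypes.contains (graphkey_token_devtype tok) = true) ∨
       (PySem.Dict.get? pvDevtypes (graphkey_token_devtype tok)).isSome = true)
instance (gk : String) (exclude_devtypes : List String) : Decidable (Pre_graphkey_device_hierarchy_label gk exclude_devtypes) := by unfold Pre_graphkey_device_hierarchy_label; infer_instance

def pvWitness_graphkey_device_hierarchy_label : String × List String :=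
  ("I:1.S:2.P:3", ["SA", "A", "B"])

def Spec_graphkey_device_hierarchy_label (gk : String) (exclude_devtypes : List String) (out : String) : Prop := out = graphkey_device_hierarchy_label_alt gk exclude_devtypes
instance (gk : String) (exclude_devtypes : List String) (out : String) : Decidable (Spec_graphkey_device_hierarchy_label gk exclude_devtypes out) := by unfold Spec_graphkey_device_hierarchy_label; infer_instance

-- ===== CLAIM (what is proved, stated in full; the proofs are below) =====
def Claim_equal_graphkey_device_hierarchy_label : Prop := ∀ (gk : String) (exclude_devtypes : List String), Dom_graphkey_device_hierarchy_label gk exclude_devtypes → Pre_graphkey_device_hierarchy_label gk exclude_devtypes → Spec_graphkey_device_hierarchy_label gk exclude_devtypes (graphkey_device_hierarchy_label gk exclude_devtypes)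

-- ===== LEMMAS AND PROOFS =====

-- PySem.Chars.splitOn with a one-char separator is core List.splitOn
theorem pvSplitGo_spec (c : Char) : ∀ (fuel : Nat) (l cur : List Char) (acc : List (List Char)),
    l.length < fuel →
    PySem.Chars.splitOn.go [c] fuel l cur acc
      = acc.reverse ++ (l.splitOn c).modifyHead (cur.reverse ++ ·) := by
  intro fuel
  induction fuel with
  | zero => intro l cur acc h; omega
  | succ fuel ih =>
    intro l cur acc h
    match l with
    | [] =>
      show PySem.Chars.splitOn.go [c] (fuel+1) [] cur acc = _
      simp [PySem.Chars.splitOn.go, List.splitOn]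
    | d :: rest =>
      by_cases hd : c = d
      · subst hd
        rw [show PySem.Chars.splitOn.go [c] (fuel+1) (c::rest) cur acc
              = PySem.Chars.splitOn.go [c] fuel rest [] (cur.reverse :: acc) by
            simp [PySem.Chars.splitOn.go, List.isPrefixOf]]
        rw [ih rest [] (cur.reverse :: acc) (by simp at h ⊢; omega)]
        have hsp : (c :: rest).splitOn c = [] :: rest.splitOn c := by
          simp [List.splitOn, List.splitOnP_cons]
        rw [hsp]
        rcases hne : rest.splitOn c with _ | ⟨hh, tt⟩
        · exact absurd hne (List.splitOnP_ne_nil _ _)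
        · simp
      · have hbe : (c == d) = false := by simp [hd]
        rw [show PySem.Chars.splitOn.go [c] (fuel+1) (d::rest) cur acc
              = PySem.Chars.splitOn.go [c] fuel rest (d::cur) acc by
            simp [PySem.Chars.splitOn.go, List.isPrefixOf, hbe]]
        rw [ih rest (d::cur) acc (by simp at h ⊢; omega)]
        have hsp : (d :: rest).splitOn c = (rest.splitOn c).modifyHead (d :: ·) := by
          have hdc : (d == c) = false := by rw [beq_eq_false_iff_ne]; exact fun h => hd h.symm
          simp [List.splitOn, List.splitOnP_cons, hdc]
        rw [hsp]
        rcases hne : rest.splitOn c with _ | ⟨hh, tt⟩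
        · exact absurd hne (List.splitOnP_ne_nil _ _)
        · simp

theorem pvSplitOn_singleton (s : List Char) (c : Char) :
    PySem.Chars.splitOn s [c] = s.splitOn c := by
  rw [show PySem.Chars.splitOn s [c] = PySem.Chars.splitOn.go [c] (s.length+1) s [] [] from rfl,
      pvSplitGo_spec c (s.length+1) s [] [] (by omega)]
  rcases hne : s.splitOn c with _ | ⟨hh, tt⟩
  · exact absurd hne (List.splitOnP_ne_nil _ _)
  · simp

theorem pvNot_mem_splitOn (l : List Char) (c : Char) : ∀ t ∈ l.splitOn c, c ∉ t := by
  induction l with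
  | nil => intro t ht; simp [List.splitOn] at ht; simp [ht]
  | cons d rest ih =>
    intro t ht
    by_cases hd : d = c
    · subst hd
      simp only [List.splitOn, List.splitOnP_cons, beq_self_eq_true] at ht
      rcases List.mem_cons.mp ht with h | h
      · simp [h]
      · exact ih t h
    · have hdc : (d == c) = false := by rw [beq_eq_false_iff_ne]; exact hd
      simp only [List.splitOn, List.splitOnP_cons, hdc] at ht
      rcases hne : rest.splitOn c with _ | ⟨hh, tt⟩
      · exact absurd hne (List.splitOnP_ne_nil _ _)
      · rw [show rest.splitOnP (· == c) = hh :: tt from hne] at ht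
        simp only [List.modifyHead] at ht
        rcases List.mem_cons.mp ht with h | h
        · subst h
          intro hmem
          rcases List.mem_cons.mp hmem with h | h
          · exact hd h.symm
          · exact ih hh (by rw [hne]; exact List.mem_cons_self) h
        · exact ih t (by rw [hne]; exact List.mem_cons_of_mem _ h)

theorem pvMem_intercalate (c : Char) (ts : List (List Char)) (hnd : ∀ t ∈ ts, c ∉ t) :
    c ∈ [c].intercalate ts ↔ 2 ≤ ts.length := by
  match ts with
  | [] => simp [List.intercalate]
  | [t] =>
    have h1 : [c].intercalate [t] = t := by simp [List.intercalate]
    rw [h1]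
    constructor
    · intro h; exact absurd h (hnd t (by simp))
    · intro h; simp at h
  | t1 :: t2 :: rest =>
    constructor
    · intro _; simp only [List.length_cons]; omega
    · intro _
      have : [c].intercalate (t1 :: t2 :: rest) = t1 ++ [c] ++ [c].intercalate (t2 :: rest) := by
        simp [List.intercalate, List.intersperse]
      rw [this]; simp

theorem pvMem_iff_two_le (s : List Char) (c : Char) : c ∈ s ↔ 2 ≤ (s.splitOn c).length := by
  conv_lhs => rw [← List.intercalate_splitOn s c]
  exact pvMem_intercalate c _ (pvNot_mem_splitOn s c)

theorem pvIsIn_singleton (sub : String) (c : Char) (h : sub.toList = [c]) (s : String) :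
    PySem.Str.isIn sub s = true ↔ c ∈ s.toList := by
  rw [show PySem.Str.isIn sub s = PySem.Chars.isIn sub.toList s.toList from rfl, h,
      PySem.Chars.isIn_iff_infix, List.singleton_infix_iff]

theorem pvSplit_char (s sep : String) (c : Char) (h : sep.toList = [c]) :
    pvSplit s sep = (s.toList.splitOn c).map String.ofList := by
  simp [pvSplit, PySem.Str.split?, PySem.Chars.split?, h, pvSplitOn_singleton]

theorem pvJoin_toList (sep : String) (us : List String) :
    (PySem.Str.join sep us).toList = sep.toList.intercalate (us.map String.toList) := by
  rw [PySem.Str.toList_join]; rfl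

theorem pvTokens_no_dot (s : String) : ∀ t ∈ pvSplit s ".", '.' ∉ t.toList := by
  intro t ht
  rw [pvSplit_char s "." '.' rfl] at ht
  obtain ⟨l, hl, rfl⟩ := List.mem_map.mp ht
  rw [String.toList_ofList]
  exact pvNot_mem_splitOn s.toList '.' l hl

theorem pvRoundtrip (us : List String) (hne : us ≠ []) (hnd : ∀ t ∈ us, '.' ∉ t.toList) :
    pvSplit (PySem.Str.join "." us) "." = us := by
  rw [pvSplit_char _ "." '.' rfl, pvJoin_toList,
      show (".":String).toList = ['.'] from rfl,
      List.splitOn_intercalate (us.map String.toList) '.'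
        (by intro l hl; obtain ⟨t, ht, rfl⟩ := List.mem_map.mp hl; exact hnd t ht)
        (by simpa using hne)]
  simp [List.map_map, Function.comp_def, String.ofList_toList]

theorem pvGk_eq_join (gk : String) : gk = PySem.Str.join "." (pvSplit gk ".") := by
  apply String.toList_inj.mp
  rw [pvJoin_toList, pvSplit_char _ "." '.' rfl, List.map_map]
  rw [show List.map (String.toList ∘ String.ofList) (List.splitOn '.' gk.toList)
        = List.splitOn '.' gk.toList by
      simp [Function.comp_def, String.toList_ofList]]
  rw [show (".":String).toList = ['.'] from rfl, List.intercalate_splitOn]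

theorem pvJoin_mem_dot (us : List String) (hnd : ∀ t ∈ us, '.' ∉ t.toList) :
    PySem.Str.isIn "." (PySem.Str.join "." us) = true ↔ 2 ≤ us.length := by
  rw [pvIsIn_singleton "." '.' rfl, pvJoin_toList, show (".":String).toList = ['.'] from rfl,
      pvMem_intercalate '.' (us.map String.toList)
        (by intro l hl; obtain ⟨t, ht, rfl⟩ := List.mem_map.mp hl; exact hnd t ht)]
  simp

theorem pvGetD_neg_one {α : Type} (xs : List α) (d : α) :
    (PySem.List.pyGet? xs (-1)).getD d = xs.getLastD d := by
  rcases xs with _ | ⟨x, t⟩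
  · simp [PySem.List.pyGet?, PySem.List.pyIdx?]
  · have h1 : PySem.List.pyIdx? (x :: t).length (-1) = some t.length := by
      simp [PySem.List.pyIdx?]
    simp only [PySem.List.pyGet?, h1, Option.bind_some]
    rw [show ((x :: t)[t.length]? ) = (x :: t).getLast? by
        rw [List.getLast?_eq_getElem?]; simp]
    rw [List.getLastD_eq_getLast?]

-- chain of parent keys of a key whose token list is us
def pvChain (us : List String) : List String :=
  if us.length ≤ 1 then [] else PySem.Str.join "." us.dropLast :: pvChain us.dropLast
termination_by us.length
decreasing_by simp [List.length_dropLast]; omega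

theorem pvStrJoin_singleton (sep p : String) : PySem.Str.join sep [p] = p := by
  apply String.toList_inj.mp
  rw [pvJoin_toList]
  simp [List.intercalate]

theorem pvStrJoin_cons_cons (sep p q : String) (rs : List String) :
    PySem.Str.join sep (p :: q :: rs) = p ++ sep ++ PySem.Str.join sep (q :: rs) := by
  apply String.toList_inj.mp
  rw [String.toList_append, String.toList_append, pvJoin_toList, pvJoin_toList]
  rw [show sep.toList.intercalate (List.map String.toList (p :: q :: rs))
        = PySem.Chars.join sep.toList (p.toList :: q.toList :: List.map String.toList rs) from rfl,
      PySem.Chars.join_cons_cons]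
  rfl

-- intercalate over a non-empty list with one more token appends "." ++ token
theorem pvIntercalate_concat (ms : List (List Char)) (hne : ms ≠ []) (la : List Char) :
    ['.'].intercalate (ms ++ [la]) = ['.'].intercalate ms ++ '.' :: la := by
  induction ms with
  | nil => exact absurd rfl hne
  | cons m ms ih =>
    rcases ms with _ | ⟨m2, ms'⟩
    · rw [show ['.'].intercalate ([m] ++ [la]) = PySem.Chars.join ['.'] (m :: la :: []) from rfl,
          PySem.Chars.join_cons_cons]
      simp [List.intercalate]
    · rw [show (m :: m2 :: ms') ++ [la] = m :: ((m2 :: ms') ++ [la]) from rfl]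
      rw [show ['.'].intercalate (m :: (m2 :: ms' ++ [la]))
            = PySem.Chars.join ['.'] (m :: (m2 :: ms' ++ [la])) from rfl]
      rw [show (m2 :: ms') ++ [la] = m2 :: (ms' ++ [la]) from rfl] at ih ⊢
      rw [PySem.Chars.join_cons_cons,
          show PySem.Chars.join ['.'] (m2 :: (ms' ++ [la])) = ['.'].intercalate (m2 :: (ms' ++ [la])) from rfl,
          ih (by simp),
          show ['.'].intercalate (m :: m2 :: ms') = PySem.Chars.join ['.'] (m :: m2 :: ms') from rfl,
          PySem.Chars.join_cons_cons]
      simp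
      rfl

theorem pvJoin_lt (us : List String) (h2 : 2 ≤ us.length) :
    (PySem.Str.join "." us.dropLast).toList.length < (PySem.Str.join "." us).toList.length := by
  obtain ⟨vs, a, rfl⟩ := (List.eq_nil_or_concat us).resolve_left (by rintro rfl; simp at h2)
  simp only [List.concat_eq_append] at h2 ⊢
  rw [List.dropLast_concat, pvJoin_toList, pvJoin_toList, show (".":String).toList = ['.'] from rfl,
      List.map_append, List.map_singleton,
      pvIntercalate_concat _ (by simp; rintro rfl; simp at h2) a.toList]
  simp

theorem pvReverse_eq {α : Type} (l : List α) (h : l ≠ []) (d : α) :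
    l.reverse = l.getLastD d :: l.dropLast.reverse := by
  obtain ⟨l', a, rfl⟩ := (List.eq_nil_or_concat l).resolve_left h
  simp

-- the split of a parent key, and A's per-parent devtype/label, in token terms
theorem pvParent_devtype (vs : List String) (hne : vs ≠ []) (hnd : ∀ t ∈ vs, '.' ∉ t.toList) :
    graphkey_devtype (PySem.Str.join "." vs) = graphkey_token_devtype (vs.getLastD "") := by
  unfold graphkey_devtype
  rw [pvRoundtrip vs hne hnd, pvGetD_neg_one]

theorem pvParent_label (vs : List String) (hne : vs ≠ []) (hnd : ∀ t ∈ vs, '.' ∉ t.toList) :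
    graphkey_current_label (PySem.Str.join "." vs)
      = (PySem.List.pyGet? (pvSplit (vs.getLastD "") ":") (-1)).getD "" := by
  unfold graphkey_current_label
  by_cases h2 : 2 ≤ vs.length
  · rw [if_pos ((pvJoin_mem_dot vs hnd).mpr h2), pvRoundtrip vs hne hnd]
    simp only [pvGetD_neg_one]
  · obtain ⟨t, rfl⟩ : ∃ t, vs = [t] := by
      rcases vs with _ | ⟨t, ts⟩
      · exact absurd rfl hne
      · rcases ts with _ | _
        · exact ⟨t, rfl⟩
        · simp at h2
    rw [if_neg (by rw [pvJoin_mem_dot [t] hnd]; simp)]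
    rw [pvStrJoin_singleton]
    rfl

theorem pvParentsLoop_spec (us : List String) (hne : us ≠ []) (hnd : ∀ t ∈ us, '.' ∉ t.toList) :
    ∀ fuel, (PySem.Str.join "." us).toList.length < fuel →
    pvParentsLoop fuel (PySem.Str.join "." us) = pvChain us := by
  intro fuel
  induction fuel generalizing us with
  | zero => intro h; omega
  | succ fuel ih => ?_
  intro hfuel
  by_cases h2 : 2 ≤ us.length
  · have hdot : PySem.Str.isIn "." (PySem.Str.join "." us) = true := (pvJoin_mem_dot us hnd).mpr h2
    have hpar : graphkey_parent (PySem.Str.join "." us) = PySem.Str.join "." us.dropLast := by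
      unfold graphkey_parent
      rw [if_pos hdot, pvRoundtrip us hne hnd]
    have hdne : us.dropLast ≠ [] := by
      rcases us with _ | ⟨a, _ | ⟨b, t⟩⟩ <;> simp_all
    have hdnd : ∀ t ∈ us.dropLast, '.' ∉ t.toList := fun t ht => hnd t (List.dropLast_subset _ ht)
    conv_rhs => rw [pvChain]
    rw [show pvParentsLoop (fuel+1) (PySem.Str.join "." us)
          = if PySem.Str.isIn "." (PySem.Str.join "." us) then
              graphkey_parent (PySem.Str.join "." us)
                :: pvParentsLoop fuel (graphkey_parent (PySem.Str.join "." us))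
            else [] from rfl,
        if_pos hdot, hpar,
        ih us.dropLast hdne hdnd (by have := pvJoin_lt us h2; omega)]
    rw [if_neg (by omega)]
  · rw [show pvParentsLoop (fuel+1) (PySem.Str.join "." us)
          = if PySem.Str.isIn "." (PySem.Str.join "." us) then
              graphkey_parent (PySem.Str.join "." us)
                :: pvParentsLoop fuel (graphkey_parent (PySem.Str.join "." us))
            else [] from rfl,
        if_neg (by rw [pvJoin_mem_dot us hnd]; omega),
        pvChain, if_pos (by omega)]


-- per-token formatting and skip condition shared by the two reductions
def pvFmt (tok : String) : String :=
  pvDevtypesGet ((PySem.List.pyGet? (pvSplit tok ":") 0).getD "") ++ " " ++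
    (PySem.List.pyGet? (pvSplit tok ":") (-1)).getD ""

def pvSkip (exclude_devtypes : List String) (tok : String) : Bool :=
  !exclude_devtypes.isEmpty &&
    exclude_devtypes.contains ((PySem.List.pyGet? (pvSplit tok ":") 0).getD "")



-- A's fold over the parents chain is a fold over the reversed dropped token list
theorem pvChain_fold (excl : List String) :
    ∀ (us : List String), (∀ t ∈ us, '.' ∉ t.toList) → ∀ (init : String),
    (pvChain us).foldl (fun text parent =>
      let pdevtype := graphkey_devtype parent
      let plabel := graphkey_current_label parent
      if !excl.isEmpty && excl.contains pdevtype then text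
      else text ++ " in " ++ pvDevtypesGet pdevtype ++ " " ++ plabel) init
    = (us.dropLast.reverse).foldl (fun text tok =>
        if pvSkip excl tok then text
        else text ++ " in " ++ pvDevtypesGet ((PySem.List.pyGet? (pvSplit tok ":") 0).getD "") ++ " "
               ++ (PySem.List.pyGet? (pvSplit tok ":") (-1)).getD "") init := by
  intro us hnd init
  induction hn : us.length using Nat.strong_induction_on generalizing us init with
  | _ n ih => ?_
  subst hn
  by_cases h2 : 2 ≤ us.length
  · have hdne : us.dropLast ≠ [] := by
      rcases us with _ | ⟨a, _ | ⟨b, t⟩⟩ <;> simp_all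
    have hdnd : ∀ t ∈ us.dropLast, '.' ∉ t.toList := fun t ht => hnd t (List.dropLast_subset _ ht)
    conv_lhs => rw [pvChain, if_neg (by omega)]
    rw [List.foldl_cons]
    conv_rhs => rw [pvReverse_eq us.dropLast hdne "", List.foldl_cons]
    simp only [pvParent_devtype us.dropLast hdne hdnd, pvParent_label us.dropLast hdne hdnd,
      pvSkip, graphkey_token_devtype]
    exact ih us.dropLast.length (by rw [List.length_dropLast]; omega) us.dropLast hdnd _ rfl
  · rw [pvChain, if_pos (by omega)]
    have hd : us.dropLast = [] := by rcases us with _ | ⟨a, _ | _⟩ <;> simp_all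
    rw [hd]
    simp

-- the token fold with a string accumulator equals " in ".join of the filtered parts
theorem pvFold_join (excl : List String) :
    ∀ (ws : List String) (p : String),
    ws.foldl (fun text tok =>
        if pvSkip excl tok then text
        else text ++ " in " ++ pvDevtypesGet ((PySem.List.pyGet? (pvSplit tok ":") 0).getD "") ++ " "
               ++ (PySem.List.pyGet? (pvSplit tok ":") (-1)).getD "") p
      = PySem.Str.join " in " (p :: (ws.filter (fun tok => !pvSkip excl tok)).map pvFmt) := by
  intro ws
  induction ws with
  | nil => intro p; exact (pvStrJoin_singleton _ _).symm
  | cons tok ws ih =>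
    intro p
    rw [List.foldl_cons, List.filter_cons]
    by_cases hs : pvSkip excl tok = true
    · rw [if_pos hs, show (!pvSkip excl tok) = false by simp [hs]]
      simp only [Bool.false_eq_true, ite_false]
      exact ih p
    · have hs' : pvSkip excl tok = false := by revert hs; cases pvSkip excl tok <;> simp
      rw [if_neg (by simp [hs']), show (!pvSkip excl tok) = true by simp [hs'], if_pos rfl]
      rw [ih _, List.map_cons]
      rcases hrest : (ws.filter (fun tok => !pvSkip excl tok)).map pvFmt with _ | ⟨r, rs⟩
      · rw [pvStrJoin_singleton, pvStrJoin_cons_cons, pvStrJoin_singleton]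
        simp [pvFmt, String.append_assoc]
      · rw [pvStrJoin_cons_cons, pvStrJoin_cons_cons, pvStrJoin_cons_cons]
        simp [pvFmt, String.append_assoc]

-- B's parts loop from a non-empty accumulator appends the filtered formatted tokens
theorem pvPartsLoop (excl : List String) :
    ∀ (ws : List String) (parts : List String), parts ≠ [] →
    ws.foldl (fun parts tok =>
      let dt := (PySem.List.pyGet? (pvSplit tok ":") 0).getD ""
      if !parts.isEmpty && (!excl.isEmpty && excl.contains dt) then parts
      else parts ++ [pvDevtypesGet dt ++ " " ++ (PySem.List.pyGet? (pvSplit tok ":") (-1)).getD ""]) parts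
      = parts ++ (ws.filter (fun tok => !pvSkip excl tok)).map pvFmt := by
  intro ws
  induction ws with
  | nil => intro parts h; simp
  | cons tok ws ih =>
    intro parts h
    have hpe : parts.isEmpty = false := by rcases parts with _ | _ <;> simp_all
    rw [List.foldl_cons, List.filter_cons]
    simp only [hpe, Bool.not_false, Bool.true_and]
    by_cases hs : pvSkip excl tok = true
    · rw [show (!excl.isEmpty && excl.contains ((PySem.List.pyGet? (pvSplit tok ":") 0).getD ""))
            = true from hs, show (!pvSkip excl tok) = false by simp [hs]]
      simp only [if_true, Bool.false_eq_true, ite_false]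
      exact ih parts h
    · have hs' : pvSkip excl tok = false := by revert hs; cases pvSkip excl tok <;> simp
      rw [show (!excl.isEmpty && excl.contains ((PySem.List.pyGet? (pvSplit tok ":") 0).getD ""))
            = false from hs', show (!pvSkip excl tok) = true by simp [hs']]
      simp only [Bool.false_eq_true, ite_false]
      refine Eq.trans (ih (parts ++ [pvDevtypesGet ((PySem.List.pyGet? (pvSplit tok ":") 0).getD "")
        ++ " " ++ (PySem.List.pyGet? (pvSplit tok ":") (-1)).getD ""]) (by simp)) ?_
      simp [pvFmt, List.append_assoc]

-- ===== VERDICT (by name: the statement is the Claim_ definition above) =====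
theorem graphkey_device_hierarchy_label_spec : Claim_equal_graphkey_device_hierarchy_label := by
  unfold Claim_equal_graphkey_device_hierarchy_label
  intro gk excl _ _
  unfold Spec_graphkey_device_hierarchy_label
  by_cases hdot : PySem.Str.isIn "." gk = true
  · set us := pvSplit gk "." with hus
    have hnd : ∀ t ∈ us, '.' ∉ t.toList := pvTokens_no_dot gk
    have hgk : gk = PySem.Str.join "." us := pvGk_eq_join gk
    have h2 : 2 ≤ us.length := by
      have hm : '.' ∈ gk.toList := (pvIsIn_singleton "." '.' rfl gk).mp hdot
      have hlen := (pvMem_iff_two_le gk.toList '.').mp hm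
      rw [hus, pvSplit_char gk "." '.' rfl, List.length_map]
      exact hlen
    have hne : us ≠ [] := by rintro h; rw [h] at h2; simp at h2
    have hdne : us.dropLast ≠ [] := by
      have hl : us.dropLast.length = us.length - 1 := List.length_dropLast (xs := us)
      intro h
      rw [h] at hl
      simp at hl
      omega
    have hdnd : ∀ t ∈ us.dropLast, '.' ∉ t.toList := fun t ht => hnd t (List.dropLast_subset _ ht)
    have hparents : all_graphkey_parents gk = pvChain us := by
      unfold all_graphkey_parents
      conv_lhs => rw [hgk]
      exact pvParentsLoop_spec us hne hnd _ (by omega)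
    have hdev : graphkey_devtype gk = graphkey_token_devtype (us.getLastD "") := by
      rw [hgk]; exact pvParent_devtype us hne hnd
    have hlab : graphkey_current_label gk
        = (PySem.List.pyGet? (pvSplit (us.getLastD "") ":") (-1)).getD "" := by
      rw [hgk]; exact pvParent_label us hne hnd
    unfold graphkey_device_hierarchy_label graphkey_device_hierarchy_label_alt
    rw [if_pos hdot, if_pos hdot]
    simp only []
    rw [hparents, hdev, hlab, pvChain_fold excl us hnd, pvFold_join excl us.dropLast.reverse]
    conv_rhs => rw [pvReverse_eq us hne "", List.foldl_cons]
    simp only [List.isEmpty_nil, Bool.not_true, Bool.false_and, Bool.false_eq_true, ite_false,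
      List.nil_append]
    rw [pvPartsLoop excl us.dropLast.reverse
          [pvDevtypesGet ((PySem.List.pyGet? (pvSplit (us.getLastD "") ":") 0).getD "") ++ " "
            ++ (PySem.List.pyGet? (pvSplit (us.getLastD "") ":") (-1)).getD ""] (by simp)]
    rfl
  · unfold graphkey_device_hierarchy_label graphkey_device_hierarchy_label_alt
    rw [if_neg hdot, if_neg hdot]
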